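-- pv_equiv track=rewrite | github.com/StanfordVLSI/dragonphy2 | verif/analysis/histogram.py | generate_bits
-- ===== SOURCE A (Python) =====
-- def generate_bits(n, bit_list):
--     result = []
--     for b in bit_list:
--         result.append(b+'1')
--         result.append(b+'0')
--     if n == 0:
--         return bit_list
--     elif n == 1:
--         return result
--     else:
--         return generate_bits(n-1, result)
-- ===== SOURCE B (Python) =====
-- def generate_bits(n, bit_list):
--     if n == 0:
--         return bit_list
--     suffixes = ['']
--     for _ in range(n):
--         suffixes = ['1' + s for s in suffixes] + ['0' + s for s in suffixes]
--     return [b + s for b in bit_list for s in suffixes]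
-- ===== Notes on version B (the rewrite author's own statement) =====
-- stated objective: alternative
-- what changed: Instead of recursively re-expanding the whole list n times, B builds the 2^n-element suffix table once and produces the result in a single cross-product pass over bit_list.
import Mathlib
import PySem

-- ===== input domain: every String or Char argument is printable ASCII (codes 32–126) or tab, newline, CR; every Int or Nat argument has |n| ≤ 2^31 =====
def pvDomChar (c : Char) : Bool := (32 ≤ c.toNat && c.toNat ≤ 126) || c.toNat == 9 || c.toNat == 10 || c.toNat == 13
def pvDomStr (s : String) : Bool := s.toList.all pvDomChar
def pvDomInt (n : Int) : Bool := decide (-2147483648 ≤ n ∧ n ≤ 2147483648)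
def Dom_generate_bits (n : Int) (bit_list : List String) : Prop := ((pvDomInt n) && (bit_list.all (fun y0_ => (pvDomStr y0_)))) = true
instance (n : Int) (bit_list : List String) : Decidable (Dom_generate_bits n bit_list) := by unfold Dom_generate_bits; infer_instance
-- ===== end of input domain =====

-- B builds the suffix table once and takes one cross product, instead of A's n recursive
-- whole-list expansions (objective: alternative; equivalence is about the return value only).

-- ===== PORT A =====
-- literal port of A: expand once, then branch on n; recursion on n-1 otherwise.
-- (the 'n ≤ 1' guard only makes the recursion total: Pre_ excludes n < 0, where Python A raises RecursionError)
def generate_bits (n : Int) (bit_list : List String) : List String :=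
  let result := bit_list.foldl (fun r b => r ++ [b ++ "1", b ++ "0"]) []
  if n = 0 then bit_list
  else if n = 1 then result
  else if n ≤ 1 then result
  else generate_bits (n - 1) result
termination_by n.toNat
decreasing_by omega

-- ===== PORT B =====
-- B-side helper: Source B's suffix-table loop 'for _ in range(n): suffixes = ['1'+s ...] + ['0'+s ...]'
def pvSuffixes (k : Nat) : List String :=
  (List.range k).foldl (fun s _ => s.map (fun t => "1" ++ t) ++ s.map (fun t => "0" ++ t)) [""]

def generate_bits_alt (n : Int) (bit_list : List String) : List String :=
  if n = 0 then bit_list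
  else bit_list.flatMap (fun b => (pvSuffixes n.toNat).map (fun s => b ++ s))

-- ===== PRECONDITION & SPEC =====
-- Pre_ excludes n < 0, where Python A raises RecursionError (the recursion never bottoms out).
def Pre_generate_bits (n : Int) (bit_list : List String) : Prop := 0 ≤ n
instance (n : Int) (bit_list : List String) : Decidable (Pre_generate_bits n bit_list) := by unfold Pre_generate_bits; infer_instance
def pvWitness_generate_bits : Int × List String := (2, ["a", "b"])
def Spec_generate_bits (n : Int) (bit_list : List String) (out : List String) : Prop := out = generate_bits_alt n bit_list
instance (n : Int) (bit_list : List String) (out : List String) : Decidable (Spec_generate_bits n bit_list out) := by unfold Spec_generate_bits; infer_instance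

-- ===== CLAIM (what is proved, stated in full; the proofs are below) =====
def Claim_equal_generate_bits : Prop := ∀ (n : Int) (bit_list : List String), Dom_generate_bits n bit_list → Pre_generate_bits n bit_list → Spec_generate_bits n bit_list (generate_bits n bit_list)

-- ===== LEMMAS AND PROOFS =====

lemma pvSuffixes_zero : pvSuffixes 0 = [""] := rfl

lemma pvSuffixes_succ (k : Nat) :
    pvSuffixes (k + 1) =
      (pvSuffixes k).map (fun t => "1" ++ t) ++ (pvSuffixes k).map (fun t => "0" ++ t) := by
  simp [pvSuffixes, List.range_succ]

lemma expand_eq_flatMap (bl : List String) :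
    bl.foldl (fun r b => r ++ [b ++ "1", b ++ "0"]) [] =
      bl.flatMap (fun b => [b ++ "1", b ++ "0"]) :=
by simp [List.flatMap]

lemma generate_bits_core (k : Nat) (bl : List String) (hk : 1 ≤ k) :
    generate_bits (k : Int) bl = bl.flatMap (fun b => (pvSuffixes k).map (fun s => b ++ s)) := by
  induction k generalizing bl with
  | zero => omega
  | succ k ih =>
    rcases Nat.eq_zero_or_pos k with hk0 | hk1
    · subst hk0
      rw [generate_bits]
      simp [pvSuffixes_succ, pvSuffixes_zero, List.flatMap]
    · have h2 : ((k : Int) + 1) ≠ 0 := by omega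
      have h3 : ((k : Int) + 1) ≠ 1 := by omega
      have h4 : ¬ ((k : Int) + 1 ≤ 1) := by omega
      rw [generate_bits]
      push_cast
      simp only [h2, h3, h4, if_false]
      have : ((k : Int) + 1 - 1) = (k : Int) := by ring
      rw [this, ih _ hk1, expand_eq_flatMap]
      rw [List.flatMap_assoc]
      apply List.flatMap_congr
      intro b _
      simp [pvSuffixes_succ, List.map_append, List.map_map, Function.comp_def,
        String.append_assoc]

-- ===== VERDICT (by name: the statement is the Claim_ definition above) =====
theorem generate_bits_spec : Claim_equal_generate_bits := by
  intro n bl _ hpre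
  unfold Spec_generate_bits generate_bits_alt
  by_cases h0 : n = 0
  · subst h0; rw [generate_bits]; simp
  · have hn : 1 ≤ n.toNat := by unfold Pre_generate_bits at hpre; omega
    have hn' : (n.toNat : Int) = n := by unfold Pre_generate_bits at hpre; omega
    rw [if_neg h0, ← hn', generate_bits_core n.toNat bl hn, Int.toNat_natCast]
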